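-- pv_equiv track=rewrite | github.com/delvtech/agent0 | lib/pypechain/pypechain/run_pypechain.py | get_intersection_and_unique
-- ===== SOURCE A (Python) =====
-- def get_intersection_and_unique(lists: list[list[str]]) -> tuple[set[str], set[str]]:
--     """Process a list of lists of strings to get the intersection and unique values.
--
--     The intersection is a set of strings that occur in all sub-lists.
--     The unique values are strings that only occur in one sub-list.
--
--     Arguments
--     ---------
--     lists : list[list[str]]
--         A list of lists of strings, where each sub-list is an entity to compute sets over.
--
--     Returns
--     -------
--     tuple[set[str], set[str]]
--         The (intersection, unique_values) sets
--     """
--     intersection = set(lists[0])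
--     for lst in lists[1:]:
--         intersection &= set(lst)
--     string_counts = {}
--     for lst in lists:
--         for item in set(lst):
--             string_counts[item] = string_counts.get(item, 0) + 1
--     unique_values = {item for item, count in string_counts.items() if count == 1}
--     return (intersection, unique_values)
-- ===== SOURCE B (Python) =====
-- def get_intersection_and_unique(lists: list[list[str]]) -> tuple[set[str], set[str]]:
--     """Same task by a different decomposition: pool every distinct string once,
--     then derive both answers as two membership filters over that pool
--     (no repeated set-intersection pass, no counter dict)."""
--     sets = [set(lst) for lst in lists]
--     seen = {s for st in sets for s in st}
--     intersection = {s for s in seen if all(s in st for st in sets)}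
--     unique_values = {s for s in seen if sum(1 for st in sets if s in st) == 1}
--     return (intersection, unique_values)
-- ===== Notes on version B (the rewrite author's own statement) =====
-- stated objective: simpler
-- what changed: Replaces A's repeated set-intersection pass and hand-rolled counter dict with one pooled set of all distinct strings and two membership filters over it.
import Mathlib
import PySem

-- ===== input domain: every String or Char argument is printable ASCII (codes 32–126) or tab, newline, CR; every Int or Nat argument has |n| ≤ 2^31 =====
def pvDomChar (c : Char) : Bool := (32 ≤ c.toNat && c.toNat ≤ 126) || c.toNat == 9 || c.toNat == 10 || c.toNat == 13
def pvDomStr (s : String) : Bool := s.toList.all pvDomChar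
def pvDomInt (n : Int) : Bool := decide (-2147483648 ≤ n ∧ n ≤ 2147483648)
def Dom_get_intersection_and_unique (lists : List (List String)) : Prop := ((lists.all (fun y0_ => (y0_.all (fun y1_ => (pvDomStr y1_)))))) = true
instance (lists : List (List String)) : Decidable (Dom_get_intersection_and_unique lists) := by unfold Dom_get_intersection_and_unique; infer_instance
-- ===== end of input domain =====

-- B replaces A's repeated set-intersection pass and counter dict with one pooled set of all
-- distinct strings and two membership filters over it (objective: simpler).

-- ===== PORT A =====
def get_intersection_and_unique (lists : List (List String)) : List String × List String :=
  match PySem.List.pyGet? lists 0 with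
  | none => ([], [])  -- lists[0] raises IndexError here; excluded by Pre_
  | some first =>
    -- intersection = set(lists[0]); for lst in lists[1:]: intersection &= set(lst)
    let intersection := (PySem.List.slice lists (some 1)).foldl
      (fun acc lst => PySem.Set.inter acc (PySem.Set.ofList lst)) (PySem.Set.ofList first)
    -- string_counts = {}; for lst in lists: for item in set(lst): string_counts[item] = string_counts.get(item, 0) + 1
    let string_counts := lists.foldl
      (fun d lst => (PySem.Set.ofList lst).foldl
        (fun d item => PySem.Dict.insert d item (PySem.Dict.getD d item 0 + 1)) d)
      (PySem.Dict.empty : PySem.Dict String Int)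
    -- unique_values = {item for item, count in string_counts.items() if count == 1}
    let unique_values := PySem.Set.ofList
      ((string_counts.items.filter (fun p => p.2 == (1 : Int))).map Prod.fst)
    (intersection, unique_values)

-- ===== PORT B =====
def get_intersection_and_unique_alt (lists : List (List String)) : List String × List String :=
  -- sets = [set(lst) for lst in lists]
  let sets := lists.map (fun lst => PySem.Set.ofList lst)
  -- seen = {s for st in sets for s in st}
  let seen := PySem.Set.ofList (sets.flatMap (fun st => st))
  -- intersection = {s for s in seen if all(s in st for st in sets)}
  let intersection := PySem.Set.ofList (seen.filter (fun s => sets.all (fun st => st.contains s)))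
  -- unique_values = {s for s in seen if sum(1 for st in sets if s in st) == 1}
  -- (the 0/1 generator sum is List.countP)
  let unique_values := PySem.Set.ofList
    (seen.filter (fun s => ((sets.countP (fun st => st.contains s) : Int) == 1)))
  (intersection, unique_values)

-- ===== PRECONDITION & SPEC =====
-- Pre_ excludes only the empty outer list, on which A raises IndexError at lists[0].
def Pre_get_intersection_and_unique (lists : List (List String)) : Prop := lists ≠ []
instance (lists : List (List String)) : Decidable (Pre_get_intersection_and_unique lists) := by unfold Pre_get_intersection_and_unique; infer_instance
def pvWitness_get_intersection_and_unique : List (List String) := [["a", "b"], ["b"]]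

def Spec_get_intersection_and_unique (lists : List (List String)) (out : List String × List String) : Prop := out = get_intersection_and_unique_alt lists
instance (lists : List (List String)) (out : List String × List String) : Decidable (Spec_get_intersection_and_unique lists out) := by unfold Spec_get_intersection_and_unique; infer_instance

-- ===== CLAIM (what is proved, stated in full; the proofs are below) =====
def Claim_equal_get_intersection_and_unique : Prop := ∀ (lists : List (List String)), Dom_get_intersection_and_unique lists → Pre_get_intersection_and_unique lists → Spec_get_intersection_and_unique lists (get_intersection_and_unique lists)

-- ===== LEMMAS AND PROOFS =====


lemma foldl_add_of_nodup (l s : List String) (h : (s ++ l).Nodup) :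
    l.foldl PySem.Set.add s = s ++ l := by
  induction l generalizing s with
  | nil => simp
  | cons x l ih =>
    have hx : x ∉ s := by
      intro hm
      exact (List.disjoint_of_nodup_append h) hm (by simp)
    have hc : PySem.Set.add s x = s ++ [x] := by
      simp [PySem.Set.add, PySem.Set.contains, hx]
    rw [List.foldl_cons, hc, ih (s ++ [x]) (by simpa using h)]
    simp

lemma ofList_self (l : List String) (h : l.Nodup) : PySem.Set.ofList l = l := by
  simpa using foldl_add_of_nodup l [] (by simpa using h)

lemma mem_foldl_add (a : List String) (s : PySem.Set String) (y : String) :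
    y ∈ a.foldl PySem.Set.add s ↔ y ∈ s ∨ y ∈ a := by
  induction a generalizing s with
  | nil => simp
  | cons x a ih =>
    rw [List.foldl_cons, ih]
    constructor
    · rintro (h | h)
      · rcases (PySem.Set.mem_add s x y).mp h with h | h
        · exact Or.inl h
        · exact Or.inr (by simp [h])
      · exact Or.inr (by simp [h])
    · rintro (h | h)
      · exact Or.inl ((PySem.Set.mem_add s x y).mpr (Or.inl h))
      · rcases List.mem_cons.mp h with h | h
        · exact Or.inl ((PySem.Set.mem_add s x y).mpr (Or.inr h))
        · exact Or.inr h

lemma foldl_add_ofList (a : List String) (s : PySem.Set String) :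
    (PySem.Set.ofList a).foldl PySem.Set.add s = a.foldl PySem.Set.add s := by
  induction a using List.reverseRecOn generalizing s with
  | nil => simp [PySem.Set.ofList]
  | append_singleton a x ih =>
    have hof : PySem.Set.ofList (a ++ [x]) = PySem.Set.add (PySem.Set.ofList a) x := by
      simp [PySem.Set.ofList]
    rw [hof, List.foldl_append]
    by_cases hx : x ∈ PySem.Set.ofList a
    · have hxa : x ∈ a := (PySem.Set.mem_ofList a x).mp hx
      have : PySem.Set.add (PySem.Set.ofList a) x = PySem.Set.ofList a := by
        simp [PySem.Set.add, PySem.Set.contains, hx]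
      rw [this, ih]
      have hxm : x ∈ a.foldl PySem.Set.add s := (mem_foldl_add a s x).mpr (Or.inr hxa)
      simp [PySem.Set.add, PySem.Set.contains, hxm]
    · have : PySem.Set.add (PySem.Set.ofList a) x = PySem.Set.ofList a ++ [x] := by
        simp [PySem.Set.add, PySem.Set.contains, hx]
      rw [this, List.foldl_append, ih]

lemma foldl_inter_eq_filter (rest : List (List String)) (s : PySem.Set String) :
    rest.foldl (fun acc lst => PySem.Set.inter acc (PySem.Set.ofList lst)) s
      = s.filter (fun x => rest.all (fun lst => (PySem.Set.ofList lst).contains x)) := by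
  induction rest generalizing s with
  | nil => simp
  | cons l rest ih =>
    rw [List.foldl_cons, ih]
    simp [PySem.Set.inter, List.filter_filter, Bool.and_comm]

lemma filter_foldl_add (ys : List String) (s : PySem.Set String) (P : String → Bool)
    (h : ∀ k, P k = true → k ∈ s) :
    ((ys.foldl PySem.Set.add s).filter P) = s.filter P := by
  induction ys generalizing s with
  | nil => rfl
  | cons y ys ih =>
    rw [List.foldl_cons]
    by_cases hy : y ∈ s
    · have : PySem.Set.add s y = s := by simp [PySem.Set.add, PySem.Set.contains, hy]
      rw [this, ih s h]
    · have hP : P y = false := by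
        cases hPy : P y with
        | false => rfl
        | true => exact absurd (h y hPy) hy
      have : PySem.Set.add s y = s ++ [y] := by simp [PySem.Set.add, PySem.Set.contains, hy]
      rw [this, ih (s ++ [y]) (fun k hk => List.mem_append_left _ (h k hk))]
      simp [List.filter_append, hP]

lemma count_flatMap_ofList (lists : List (List String)) (k : String) :
    (lists.flatMap (fun l => PySem.Set.ofList l)).count k
      = lists.countP (fun l => (PySem.Set.ofList l).contains k) := by
  induction lists with
  | nil => simp
  | cons l lists ih =>
    rw [List.flatMap_cons, List.count_append, ih, List.countP_cons]
    have hnd := PySem.Set.nodup_ofList l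
    by_cases hm : k ∈ PySem.Set.ofList l
    · rw [List.count_eq_one_of_mem hnd hm]
      simp [PySem.Set.contains, hm, Nat.add_comm]
    · rw [List.count_eq_zero.mpr hm]
      simp [PySem.Set.contains, hm]

lemma find?_beq_self (l : List String) (x : String) (h : x ∈ l) :
    l.find? (· == x) = some x := by
  induction l with
  | nil => simp at h
  | cons y l ih =>
    by_cases hyx : y = x
    · subst hyx; simp
    · rw [List.find?_cons_of_neg (by simp [hyx])]
      have hx : x ∈ l := by
        rcases List.mem_cons.mp h with h' | h'
        · exact absurd h'.symm hyx
        · exact h'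
      exact ih hx

lemma counter_items (xs : List String) :
    (xs.foldl (fun d x => PySem.Dict.insert d x (PySem.Dict.getD d x 0 + 1))
        (PySem.Dict.empty : PySem.Dict String Int)).items
      = (PySem.Set.ofList xs).map (fun k => (k, (xs.count k : Int))) := by
  induction xs using List.reverseRecOn with
  | nil => rfl
  | append_singleton xs x ih =>
    rw [List.foldl_append, List.foldl_cons, List.foldl_nil]
    generalize hD : xs.foldl (fun d x => PySem.Dict.insert d x (PySem.Dict.getD d x 0 + 1))
        (PySem.Dict.empty : PySem.Dict String Int) = D
    rw [hD] at ih
    have hofl : PySem.Set.ofList (xs ++ [x]) = PySem.Set.add (PySem.Set.ofList xs) x := by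
      simp [PySem.Set.ofList]
    by_cases hx : x ∈ xs
    · -- key already present: in-place overwrite
      have hxo : x ∈ PySem.Set.ofList xs := (PySem.Set.mem_ofList xs x).mpr hx
      have hcont : D.contains x = true := by
        rw [PySem.Dict.contains, ih, List.any_map]
        exact List.any_eq_true.mpr ⟨x, hxo, by simp⟩
      have hget : PySem.Dict.getD D x 0 = (xs.count x : Int) := by
        rw [PySem.Dict.getD, PySem.Dict.get?, ih, List.find?_map]
        have : (List.find? ((fun p => p.1 == x) ∘ fun k => (k, (xs.count k : Int))) (PySem.Set.ofList xs))
            = some x := find?_beq_self _ x hxo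
        rw [this]
        rfl
      rw [PySem.Dict.insert, if_pos hcont, hofl]
      have hadd : PySem.Set.add (PySem.Set.ofList xs) x = PySem.Set.ofList xs := by
        simp [PySem.Set.add, PySem.Set.contains, hxo]
      rw [hadd]
      show (D.items.map fun p => if (p.1 == x) = true then (x, PySem.Dict.getD D x 0 + 1) else p)
        = (PySem.Set.ofList xs).map (fun k => (k, ((xs ++ [x]).count k : Int)))
      rw [ih, List.map_map, hget]
      apply List.map_congr_left
      intro k hk
      by_cases hkx : k = x
      · subst hkx
        simp [List.count_append]
      · have hbe : (k == x) = false := by simpa using hkx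
        have hbe2 : (x == k) = false := by simpa using (Ne.symm hkx)
        simp [Function.comp, hbe, List.count_append, List.count_singleton, hbe2]
    · -- new key: appended at the end
      have hxo : x ∉ PySem.Set.ofList xs := fun h => hx ((PySem.Set.mem_ofList xs x).mp h)
      have hcont : D.contains x = false := by
        rw [PySem.Dict.contains, ih, List.any_map]
        rw [List.any_eq_false]
        intro k hk
        simp only [Function.comp_apply, beq_iff_eq]
        intro hkx
        exact hxo (hkx ▸ hk)
      have hget : PySem.Dict.getD D x 0 = 0 := by
        rw [PySem.Dict.getD, PySem.Dict.get?, ih, List.find?_map]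
        have : (List.find? ((fun p => p.1 == x) ∘ fun k => (k, (xs.count k : Int))) (PySem.Set.ofList xs))
            = none := by
          rw [List.find?_eq_none]
          intro k hk
          simp only [Function.comp, beq_iff_eq]
          intro hkx
          exact hxo (hkx ▸ hk)
        rw [this]
        rfl
      rw [PySem.Dict.insert, if_neg (by simp [hcont]), hofl, hget]
      have hadd : PySem.Set.add (PySem.Set.ofList xs) x = PySem.Set.ofList xs ++ [x] := by
        simp [PySem.Set.add, PySem.Set.contains, hxo]
      rw [hadd]
      show D.items ++ [(x, (0 : Int) + 1)]
        = (PySem.Set.ofList xs ++ [x]).map (fun k => (k, ((xs ++ [x]).count k : Int)))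
      rw [List.map_append, ih]
      congr 1
      · apply List.map_congr_left
        intro k hk
        have hkx : k ≠ x := fun h => hxo (h ▸ hk)
        have hbe2 : (x == k) = false := by simpa using (Ne.symm hkx)
        simp [List.count_append, List.count_singleton, hbe2]
      · have hc0 : xs.count x = 0 := List.count_eq_zero.mpr hx
        simp [List.count_append, hc0]

-- ===== VERDICT (by name: the statement is the Claim_ definition above) =====
theorem get_intersection_and_unique_spec : Claim_equal_get_intersection_and_unique := by
  intro lists _ hpre
  unfold Spec_get_intersection_and_unique
  cases lists with
  | nil => exact absurd rfl hpre
  | cons l0 rest =>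
    unfold get_intersection_and_unique get_intersection_and_unique_alt
    have hget0 : PySem.List.pyGet? (l0 :: rest) 0 = some l0 := by simp [pysem]
    rw [hget0]
    have hslice : PySem.List.slice (l0 :: rest) (some 1) = rest := by simp [pysem]
    rw [hslice]
    have hFM : ((l0 :: rest).map (fun lst => PySem.Set.ofList lst)).flatMap (fun st => st)
        = (l0 :: rest).flatMap (fun l => PySem.Set.ofList l) := by
      simp [List.flatMap_def, Function.comp_def]
    -- the pooled set `seen`, re-based on l0's distinct elements
    have hseen : PySem.Set.ofList (((l0 :: rest).map (fun lst => PySem.Set.ofList lst)).flatMap (fun st => st))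
        = (rest.flatMap (fun l => PySem.Set.ofList l)).foldl PySem.Set.add (PySem.Set.ofList l0) := by
      rw [hFM, List.flatMap_cons]
      show (PySem.Set.ofList l0 ++ rest.flatMap (fun l => PySem.Set.ofList l)).foldl PySem.Set.add []
        = (rest.flatMap (fun l => PySem.Set.ofList l)).foldl PySem.Set.add (PySem.Set.ofList l0)
      rw [List.foldl_append, foldl_add_ofList]
      rfl
    -- first component: A's repeated `&=` = B's membership filter over `seen`
    have h1 : rest.foldl (fun acc lst => PySem.Set.inter acc (PySem.Set.ofList lst)) (PySem.Set.ofList l0)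
        = PySem.Set.ofList (List.filter
            (fun s => ((l0 :: rest).map (fun lst => PySem.Set.ofList lst)).all (fun st => st.contains s))
            (PySem.Set.ofList (((l0 :: rest).map (fun lst => PySem.Set.ofList lst)).flatMap (fun st => st)))) := by
      rw [foldl_inter_eq_filter, hseen]
      rw [filter_foldl_add _ _ _ (by
        intro k hk
        rw [List.map_cons, List.all_cons] at hk
        have := (Bool.and_eq_true _ _).mp hk |>.1
        exact List.contains_iff_mem.mp this)]
      rw [ofList_self _ ((PySem.Set.nodup_ofList l0).filter _)]
      apply List.filter_congr
      intro x hx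
      rw [List.map_cons, List.all_cons, List.all_map]
      have hxl0 : x ∈ l0 := (PySem.Set.mem_ofList l0 x).mp hx
      simp [Function.comp_def]
      exact fun _ => hxl0
    -- second component: A's counter-dict comprehension = B's countP filter over `seen`
    have h2 : PySem.Set.ofList (List.map Prod.fst (List.filter (fun p => p.2 == (1 : Int))
          (List.foldl (fun d lst => List.foldl
              (fun d item => PySem.Dict.insert d item (PySem.Dict.getD d item 0 + 1)) d
              (PySem.Set.ofList lst))
            (PySem.Dict.empty : PySem.Dict String Int) (l0 :: rest)).items))
        = PySem.Set.ofList (List.filter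
            (fun s => ((((l0 :: rest).map (fun lst => PySem.Set.ofList lst)).countP
                (fun st => st.contains s) : Int) == 1))
            (PySem.Set.ofList (((l0 :: rest).map (fun lst => PySem.Set.ofList lst)).flatMap (fun st => st)))) := by
      rw [← List.foldl_flatMap, counter_items, List.filter_map, List.map_map]
      have hid : (Prod.fst ∘ fun k => (k, (((l0 :: rest).flatMap (fun l => PySem.Set.ofList l)).count k : Int)))
          = fun k => k := by
        funext k; rfl
      rw [hid, List.map_id'']
      rw [hFM]
      congr 1
      apply List.filter_congr
      intro x hx
      show (((((l0 :: rest).flatMap (fun l => PySem.Set.ofList l)).count x : Nat) : Int) == 1)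
        = ((((l0 :: rest).map (fun lst => PySem.Set.ofList lst)).countP (fun st => st.contains x) : Int) == 1)
      rw [List.countP_map, count_flatMap_ofList]
      rfl
      exact fun _ => rfl
    dsimp only
    rw [h1, h2]
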